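-- pv_equiv track=rewrite | github.com/zhoucz97/autocodebench-iclr | MultiLanguageSandbox/src/test/deps/python/50.py | total_smoked_cigarettes
-- ===== SOURCE A (Python) =====
-- def total_smoked_cigarettes(n, k):
--     """
--     Calculates the total number of cigarettes Peter can smoke.
--     Peter starts with n cigarettes and can exchange k butts for one new cigarette.
--     The function takes two arguments, n and k, where n is the initial number of cigarettes,
--     and k is the number of cigarette butts needed to exchange for one new cigarette.
--     The function returns the total number of cigarettes Peter can smoke.
--     Example:
--     >>> total_smoked_cigarettes(4, 3)
--         5
--     >>> total_smoked_cigarettes(10, 3)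
--         14
--     """
--     total = 0
--     butts = 0
--
--     while n > 0:
--         # Smoke all available cigarettes
--         total += n
--         butts += n
--         n = 0
--
--         # Exchange butts for new cigarettes
--         if butts >= k:
--             new_cigs = butts // k
--             n = new_cigs
--             butts = butts % k
--
--     return total
-- ===== SOURCE B (Python) =====
-- def total_smoked_cigarettes(n, k):
--     # Closed form: each exchange turns k butts into 1 cigarette (worth 1 extra butt),
--     # so beyond the first cigarette every k-1 butts yield one more smoke.
--     if n <= 0:
--         return 0
--     return n + (n - 1) // (k - 1)
-- ===== Notes on version B (the rewrite author's own statement) =====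
-- stated objective: faster
-- what changed: Replaces the simulation loop (smoke, accumulate butts, exchange, repeat) by the O(1) closed form n + (n-1)//(k-1).
-- outside the precondition, e.g. on total_smoked_cigarettes(3, -1): A returns 3, B returns 2; on total_smoked_cigarettes(2, 0): A raises ZeroDivisionError, B returns 1; on total_smoked_cigarettes(2, 1): A does not finish within the time limit, B raises ZeroDivisionError
import Mathlib
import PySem

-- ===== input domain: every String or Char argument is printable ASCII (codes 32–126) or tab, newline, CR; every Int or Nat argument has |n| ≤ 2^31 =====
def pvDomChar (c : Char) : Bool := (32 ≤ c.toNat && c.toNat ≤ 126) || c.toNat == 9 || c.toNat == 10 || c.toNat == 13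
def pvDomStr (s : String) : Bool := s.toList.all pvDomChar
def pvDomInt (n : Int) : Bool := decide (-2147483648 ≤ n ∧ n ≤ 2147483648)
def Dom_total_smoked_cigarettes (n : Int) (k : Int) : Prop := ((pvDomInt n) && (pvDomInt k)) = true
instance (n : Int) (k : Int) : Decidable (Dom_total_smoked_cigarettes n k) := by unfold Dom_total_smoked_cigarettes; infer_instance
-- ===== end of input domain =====

-- B replaces A's simulation loop by the O(1) closed form n + (n-1)//(k-1) (objective: faster).

-- ===== PORT A =====
-- A's `while n > 0` loop, transliterated with fuel; (2*n).toNat+1 iterations always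
-- suffice on Pre_ (the loop smokes at least one cigarette per iteration and the grand
-- total is at most 2n); fuel can only run out outside Pre_ (k = 1), where A diverges.
def tscLoop (fuel : Nat) (n k total butts : Int) : Int :=
  match fuel with
  | 0 => total
  | fuel + 1 =>
    if n > 0 then
      let total := total + n
      let butts := butts + n
      -- n = 0
      if butts ≥ k then
        tscLoop fuel (PySem.Int.floordiv butts k) k total (PySem.Int.mod butts k)
      else
        tscLoop fuel 0 k total butts
    else total

def total_smoked_cigarettes (n : Int) (k : Int) : Int :=
  tscLoop ((2 * n).toNat + 1) n k 0 0

-- ===== PORT B =====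
def total_smoked_cigarettes_alt (n : Int) (k : Int) : Int :=
  if n ≤ 0 then 0
  else n + PySem.Int.floordiv (n - 1) (k - 1)

-- ===== PRECONDITION & SPEC =====
-- Pre_ excludes positive n with k ≤ 1: there A raises ZeroDivisionError (k = 0),
-- loops forever (k = 1), and for negative k the exchange rate is meaningless, so
-- neither program's value is the specified one (A returns n, B a smaller number).
def Pre_total_smoked_cigarettes (n : Int) (k : Int) : Prop := n ≤ 0 ∨ 2 ≤ k
instance (n : Int) (k : Int) : Decidable (Pre_total_smoked_cigarettes n k) := by
  unfold Pre_total_smoked_cigarettes; infer_instance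

def pvWitness_total_smoked_cigarettes : Int × Int := (10, 3)

def Spec_total_smoked_cigarettes (n : Int) (k : Int) (out : Int) : Prop := out = total_smoked_cigarettes_alt n k
instance (n : Int) (k : Int) (out : Int) : Decidable (Spec_total_smoked_cigarettes n k out) := by unfold Spec_total_smoked_cigarettes; infer_instance

-- ===== CLAIM (what is proved, stated in full; the proofs are below) =====
def Claim_equal_total_smoked_cigarettes : Prop := ∀ (n : Int) (k : Int), Dom_total_smoked_cigarettes n k → Pre_total_smoked_cigarettes n k → Spec_total_smoked_cigarettes n k (total_smoked_cigarettes n k)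

-- ===== LEMMAS AND PROOFS =====

-- The key exchange identity: with B = q*k + r (q = B//k, r = B%k, k ≥ 2, B ≥ k),
-- (B-1)//(k-1) = q + (r + q - 1)//(k-1).
theorem tsc_exchange (B k : Int) (hk : 2 ≤ k) :
    PySem.Int.floordiv (B - 1) (k - 1) =
      PySem.Int.floordiv B k +
        PySem.Int.floordiv (PySem.Int.mod B k + PySem.Int.floordiv B k - 1) (k - 1) := by
  have hk1 : (0:Int) < k - 1 := by omega
  have hk0 : (0:Int) < k := by omega
  have hqr := PySem.Int.floordiv_mul_add_mod B k
  rw [PySem.Int.floordiv_eq_ediv_of_pos hk1, PySem.Int.floordiv_eq_ediv_of_pos hk1]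
  set q := PySem.Int.floordiv B k with hq
  set r := PySem.Int.mod B k with hr
  have hB : B = q * k + r := by omega
  have h2 : B - 1 = (r + q - 1) + q * (k - 1) := by rw [hB]; ring
  rw [h2, Int.add_mul_ediv_right _ _ (by omega : k - 1 ≠ 0)]
  ring

-- Loop invariant: with k ≥ 2, n ≥ 1, butts ≥ 0 and enough fuel,
-- the loop returns total + n + (butts + n - 1)//(k-1).
theorem tscLoop_closed (fuel : Nat) :
    ∀ (n k total butts : Int), 2 ≤ k → 1 ≤ n → 0 ≤ butts →
      (n + PySem.Int.floordiv (butts + n - 1) (k - 1)).toNat < fuel →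
      tscLoop fuel n k total butts =
        total + n + PySem.Int.floordiv (butts + n - 1) (k - 1) := by
  induction fuel with
  | zero => intro n k total butts _ _ _ hf; omega
  | succ m ih =>
    intro n k total butts hk hn hb hf
    have hk1 : (0:Int) < k - 1 := by omega
    have hB1 : 1 ≤ butts + n := by omega
    rw [tscLoop]
    simp only [show n > 0 from by omega, if_true]
    by_cases hge : butts + n ≥ k
    · simp only [hge, if_true]
      set B := butts + n with hBdef
      have hq1 : 1 ≤ PySem.Int.floordiv B k := by
        rw [PySem.Int.floordiv_eq_ediv_of_pos (by omega : (0:Int) < k)]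
        exact Int.le_ediv_iff_mul_le (by omega) |>.mpr (by omega)
      have hr0 : 0 ≤ PySem.Int.mod B k := by
        rw [PySem.Int.mod_eq_emod_of_pos (by omega : (0:Int) < k)]
        exact Int.emod_nonneg B (by omega)
      have hex := tsc_exchange B k hk
      have hdnn : 0 ≤ PySem.Int.floordiv (B - 1) (k - 1) := by
        rw [PySem.Int.floordiv_eq_ediv_of_pos hk1]
        exact Int.ediv_nonneg (by omega) (by omega)
      have hd2 : 0 ≤ PySem.Int.floordiv (PySem.Int.mod B k + PySem.Int.floordiv B k - 1) (k - 1) := by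
        rw [PySem.Int.floordiv_eq_ediv_of_pos hk1]
        exact Int.ediv_nonneg (by omega) (by omega)
      rw [ih (PySem.Int.floordiv B k) k (total + n) (PySem.Int.mod B k) hk hq1 hr0
            (by omega)]
      have : butts + n - 1 = B - 1 := by omega
      rw [this]
      omega
    · simp only [hge, if_false]
      have hz : PySem.Int.floordiv (butts + n - 1) (k - 1) = 0 := by
        rw [PySem.Int.floordiv_eq_ediv_of_pos hk1]
        exact Int.ediv_eq_zero_of_lt (by omega) (by omega)
      rw [hz]
      match m with
      | 0 => rw [tscLoop]; omega
      | m' + 1 =>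
        rw [tscLoop]
        simp only [show ¬ ((0:Int) > 0) from by omega, if_false]
        omega

-- ===== VERDICT (by name: the statement is the Claim_ definition above) =====
theorem total_smoked_cigarettes_spec : Claim_equal_total_smoked_cigarettes := by
  intro n k _ hpre
  unfold Spec_total_smoked_cigarettes total_smoked_cigarettes total_smoked_cigarettes_alt
  by_cases hn : n ≤ 0
  · simp only [hn, if_true]
    rw [tscLoop]
    simp only [show ¬ (n > 0) from by omega, if_false]
  · have hk : 2 ≤ k := by rcases hpre with h | h <;> omega
    have hn1 : 1 ≤ n := by omega
    have hk1 : (0:Int) < k - 1 := by omega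
    have hd0 : 0 ≤ PySem.Int.floordiv (n - 1) (k - 1) := by
      rw [PySem.Int.floordiv_eq_ediv_of_pos hk1]
      exact Int.ediv_nonneg (by omega) (by omega)
    have hdle : PySem.Int.floordiv (n - 1) (k - 1) ≤ n - 1 := by
      rw [PySem.Int.floordiv_eq_ediv_of_pos hk1]
      exact Int.ediv_le_self _ (by omega)
    have hbound : (n + PySem.Int.floordiv (0 + n - 1) (k - 1)).toNat < (2 * n).toNat + 1 := by
      simp only [zero_add]; omega
    rw [tscLoop_closed ((2 * n).toNat + 1) n k 0 0 hk hn1 le_rfl hbound]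
    simp only [zero_add, show ¬ n ≤ 0 from hn, if_false]
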